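-- pv_equiv track=rewrite | github.com/sgllearn/PMAE | MF/pro_wordtoken.py | match_ntld_to_wtl
-- ===== SOURCE A (Python) =====
-- def match_ntld_to_wtl(ntld, wtl):
--     """将NTLD转换为基于WTL的变长Token序列"""
--     word_token_sequence = []
--     i = 0
--     while i < len(ntld):
--         for token in wtl:
--             if ntld[i:i + len(token)] == token:
--                 word_token_sequence.append(token)
--                 i += len(token)
--                 break
--         else:
--             word_token_sequence.append('-')
--             i += 1
--     return word_token_sequence
-- ===== SOURCE B (Python) =====
-- def match_ntld_to_wtl(ntld, wtl):
--     """将NTLD转换为基于WTL的变长Token序列"""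
--     first = {}
--     for idx, t in enumerate(wtl):
--         if t not in first:
--             first[t] = idx
--     lengths = sorted({len(t) for t in first})
--     n = len(ntld)
--     out = []
--     i = 0
--     while i < n:
--         best = None
--         for L in lengths:
--             if i + L <= n:
--                 c = first.get(ntld[i:i + L])
--                 if c is not None and (best is None or c < best[0]):
--                     best = (c, ntld[i:i + L])
--         if best is None:
--             out.append('-')
--             i += 1
--         else:
--             out.append(best[1])
--             i += len(best[1])
--     return out
-- ===== Notes on version B (the rewrite author's own statement) =====
-- stated objective: faster
-- what changed: A rescans the whole wordlist at every position comparing each token against a fresh slice; B precomputes a token->first-index dict plus the sorted set of distinct token lengths once, then at each position probes one substring per distinct length and keeps the candidate with the smallest wordlist index.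
import Mathlib
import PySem

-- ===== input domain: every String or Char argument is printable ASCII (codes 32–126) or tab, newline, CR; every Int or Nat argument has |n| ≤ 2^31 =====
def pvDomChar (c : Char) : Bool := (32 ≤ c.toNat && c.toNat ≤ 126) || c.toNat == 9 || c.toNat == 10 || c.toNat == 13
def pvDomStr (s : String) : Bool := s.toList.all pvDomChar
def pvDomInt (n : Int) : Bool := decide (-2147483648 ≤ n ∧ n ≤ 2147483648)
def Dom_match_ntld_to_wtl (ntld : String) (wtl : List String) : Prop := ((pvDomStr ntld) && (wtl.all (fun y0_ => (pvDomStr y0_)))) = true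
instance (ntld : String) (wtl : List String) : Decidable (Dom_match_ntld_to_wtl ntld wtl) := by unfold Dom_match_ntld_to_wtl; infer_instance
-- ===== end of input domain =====

-- B replaces A's per-position scan of the whole wordlist by a precomputed token→first-index
-- dictionary probed once per distinct token length (objective: faster).
-- Both while loops are ported with fuel = len(ntld): whenever a loop returns in Python every
-- matched token is nonempty, so len(ntld) iterations suffice; where Python diverges ('' matched
-- forever) nothing returns in Python and both fuelled ports still agree with each other.

-- ===== PORT A =====
-- ntld[i:i+len(token)] (i, len ≥ 0): Python slice, exact via PySem.List.slice
def pvSliceA (cs : List Char) (i L : Nat) : List Char :=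
  PySem.List.slice cs (some (i : Int)) (some ((i : Int) + (L : Int)))

-- the 'for token in wtl: if ntld[i:i+len(token)] == token: … break / else:' scan
def pvFindA (cs : List Char) (i : Nat) : List String → Option String
  | [] => none
  | t :: rest =>
    if pvSliceA cs i t.toList.length = t.toList then some t else pvFindA cs i rest

-- the 'while i < len(ntld)' loop; fuel bounds the iteration count (= len(ntld) under Pre_)
def pvLoopA (cs : List Char) (wtl : List String) : Nat → Nat → List String → List String
  | 0, _, acc => acc
  | fuel + 1, i, acc =>
    if i < cs.length then
      match pvFindA cs i wtl with
      | some t => pvLoopA cs wtl fuel (i + t.toList.length) (acc ++ [t])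
      | none => pvLoopA cs wtl fuel (i + 1) (acc ++ ["-"])
    else acc

def match_ntld_to_wtl (ntld : String) (wtl : List String) : List String :=
  pvLoopA ntld.toList wtl ntld.toList.length 0 []

-- ===== PORT B =====
-- ntld[i:i+L] in Source B (i, L ≥ 0): Python slice, exact via PySem.List.slice
def pvSliceB (cs : List Char) (i L : Nat) : List Char :=
  PySem.List.slice cs (some (i : Int)) (some ((i : Int) + (L : Int)))

-- 'for idx, t in enumerate(wtl): if t not in first: first[t] = idx'
def pvFirstDict (wtl : List String) : PySem.Dict String Int :=
  (PySem.List.enumerate wtl 0).foldl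
    (fun d p => if d.contains p.2 then d else d.insert p.2 p.1) PySem.Dict.empty

-- 'lengths = sorted({len(t) for t in first})'
def pvLengths (wtl : List String) : List Nat :=
  PySem.List.sorted
    (PySem.Set.ofList ((pvFirstDict wtl).keys.map (fun t => t.toList.length)))
    (fun x => x) false

-- the 'for L in lengths: …' probe picking the candidate with the smallest wtl-index
def pvBest (cs : List Char) (d : PySem.Dict String Int) (ls : List Nat) (i : Nat) :
    Option (Int × String) :=
  ls.foldl (fun best L =>
    if i + L ≤ cs.length then
      match d.get? (String.ofList (pvSliceB cs i L)) with
      | some c =>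
        match best with
        | none => some (c, String.ofList (pvSliceB cs i L))
        | some b => if c < b.1 then some (c, String.ofList (pvSliceB cs i L)) else best
      | none => best
    else best) none

-- B's 'while i < n' loop, fuel as in A
def pvLoopB (cs : List Char) (d : PySem.Dict String Int) (ls : List Nat) :
    Nat → Nat → List String → List String
  | 0, _, acc => acc
  | fuel + 1, i, acc =>
    if i < cs.length then
      match pvBest cs d ls i with
      | some b => pvLoopB cs d ls fuel (i + b.2.toList.length) (acc ++ [b.2])
      | none => pvLoopB cs d ls fuel (i + 1) (acc ++ ["-"])
    else acc

def match_ntld_to_wtl_alt (ntld : String) (wtl : List String) : List String :=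
  pvLoopB ntld.toList (pvFirstDict wtl) (pvLengths wtl) ntld.toList.length 0 []

-- ===== PRECONDITION & SPEC =====
def Spec_match_ntld_to_wtl (ntld : String) (wtl : List String) (out : List String) : Prop :=
  out = match_ntld_to_wtl_alt ntld wtl
instance (ntld : String) (wtl : List String) (out : List String) :
    Decidable (Spec_match_ntld_to_wtl ntld wtl out) := by
  unfold Spec_match_ntld_to_wtl; infer_instance

-- ===== CLAIM (what is proved, stated in full; the proofs are below) =====
def Claim_equal_match_ntld_to_wtl : Prop :=
  ∀ (ntld : String) (wtl : List String), Dom_match_ntld_to_wtl ntld wtl →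
    Spec_match_ntld_to_wtl ntld wtl (match_ntld_to_wtl ntld wtl)

-- ===== LEMMAS AND PROOFS =====

theorem pvSliceA_eq (cs : List Char) (i L : Nat) :
    pvSliceA cs i L = (cs.drop i).take L := by
  simpa [pvSliceA] using PySem.List.slice_natCast_add cs i L

theorem pvSliceB_eq (cs : List Char) (i L : Nat) :
    pvSliceB cs i L = (cs.drop i).take L := by
  simpa [pvSliceB] using PySem.List.slice_natCast_add cs i L

-- A's inner scan is find? over the matching predicate
theorem pvFindA_eq_find? (cs : List Char) (i : Nat) (l : List String) :
    pvFindA cs i l =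
      l.find? (fun t => decide ((cs.drop i).take t.toList.length = t.toList)) := by
  induction l with
  | nil => rfl
  | cons t rest ih =>
    rw [pvFindA, pvSliceA_eq]
    by_cases h : (cs.drop i).take t.toList.length = t.toList
    · rw [if_pos h, List.find?_cons_of_pos (by simpa using h)]
    · rw [if_neg h, List.find?_cons_of_neg (by simpa using h), ih]

-- lookup in the first-occurrence dict is list.index
theorem pvFirstAux (l : List String) : ∀ (s : Int) (d : PySem.Dict String Int) (t : String),
    ((PySem.List.enumerate l s).foldl
        (fun d p => if d.contains p.2 then d else d.insert p.2 p.1) d).get? t =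
      if d.contains t then d.get? t
      else Option.map (fun k : Nat => s + (k : Int)) (PySem.List.index? l t) := by
  induction l with
  | nil =>
    intro s d t
    by_cases h : d.contains t = true
    · simp [PySem.List.enumerate, h]
    · simp only [Bool.not_eq_true] at h
      simp [PySem.List.enumerate, h,
        (PySem.Dict.get?_eq_none_iff_contains d t).mpr h]
  | cons x l ih =>
    intro s d t
    rw [PySem.List.enumerate_cons]
    simp only [List.foldl_cons]
    by_cases hx : d.contains x = true
    · rw [if_pos hx, ih]
      by_cases ht : d.contains t = true
      · rw [if_pos ht, if_pos ht]
      · rw [if_neg ht, if_neg ht]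
        have hne : x ≠ t := fun h => ht (h ▸ hx)
        rw [PySem.List.index?_cons_of_ne _ hne, Option.map_map]
        apply Option.map_congr
        intro k _
        simp only [Function.comp_apply]
        push_cast
        ring
    · rw [if_neg hx, ih]
      by_cases hxt : x = t
      · subst hxt
        rw [if_pos (PySem.Dict.contains_insert_self d x s)]
        rw [PySem.Dict.get?_insert_self]
        simp only [Bool.not_eq_true] at hx
        rw [if_neg (by rw [hx]; exact Bool.false_ne_true)]
        rw [PySem.List.index?_cons_self]
        simp
      · have h1 : (d.insert x s).contains t = d.contains t := by
          rw [PySem.Dict.contains_insert]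
          simp [show (t == x) = false from by simp [Ne.symm hxt]]
        rw [h1]
        by_cases ht : d.contains t = true
        · rw [if_pos ht, if_pos ht, PySem.Dict.get?_insert_of_ne d s (Ne.symm hxt)]
        · rw [if_neg ht, if_neg ht]
          rw [PySem.List.index?_cons_of_ne _ hxt, Option.map_map]
          apply Option.map_congr
          intro k _
          simp only [Function.comp_apply]
          push_cast
          ring

theorem pvFirstDict_get? (wtl : List String) (t : String) :
    (pvFirstDict wtl).get? t = Option.map (fun k : Nat => (k : Int)) (PySem.List.index? wtl t) := by
  rw [pvFirstDict, pvFirstAux]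
  simp [PySem.Dict.contains_empty]

theorem mem_keys_pvFirstDict (wtl : List String) (t : String) :
    t ∈ (pvFirstDict wtl).keys ↔ t ∈ wtl := by
  rw [← not_iff_not, ← PySem.Dict.get?_eq_none_iff_not_mem_keys, pvFirstDict_get?]
  rw [Option.map_eq_none_iff, PySem.List.index?_eq_none_iff]

theorem mem_pvLengths (wtl : List String) (L : Nat) :
    L ∈ pvLengths wtl ↔ ∃ t ∈ wtl, t.toList.length = L := by
  rw [pvLengths, PySem.List.mem_sorted, PySem.Set.mem_ofList, List.mem_map]
  constructor
  · rintro ⟨t, ht, rfl⟩; exact ⟨t, (mem_keys_pvFirstDict wtl t).mp ht, rfl⟩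
  · rintro ⟨t, ht, rfl⟩; exact ⟨t, (mem_keys_pvFirstDict wtl t).mpr ht, rfl⟩

-- the candidate produced at probe length L
def pvCand (cs : List Char) (d : PySem.Dict String Int) (i L : Nat) : Option (Int × String) :=
  if i + L ≤ cs.length then
    (d.get? (String.ofList (pvSliceB cs i L))).map (fun c => (c, String.ofList (pvSliceB cs i L)))
  else none

-- the min-by-index accumulation step
def pvStep (b q : Option (Int × String)) : Option (Int × String) :=
  match q with
  | none => b
  | some p =>
    match b with
    | none => some p
    | some b' => if p.1 < b'.1 then some p else b

theorem pvBest_eq_foldStep (cs : List Char) (d : PySem.Dict String Int) (ls : List Nat) (i : Nat) :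
    pvBest cs d ls i = ls.foldl (fun b L => pvStep b (pvCand cs d i L)) none := by
  unfold pvBest
  congr 1
  funext b L
  unfold pvCand pvStep
  by_cases h : i + L ≤ cs.length
  · rw [if_pos h, if_pos h]
    cases d.get? (String.ofList (pvSliceB cs i L)) <;> cases b <;> simp
  · rw [if_neg h, if_neg h]

theorem pvFold_none (g : Nat → Option (Int × String)) (ls : List Nat) (b0 : Option (Int × String))
    (h : ∀ L ∈ ls, g L = none) :
    ls.foldl (fun b L => pvStep b (g L)) b0 = b0 := by
  induction ls generalizing b0 with
  | nil => rfl
  | cons L ls ih =>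
    simp only [List.foldl_cons, h L (by simp)]
    rw [show pvStep b0 none = b0 from rfl]
    exact ih b0 (fun L' hL' => h L' (by simp [hL']))

theorem pvFold_min (g : Nat → Option (Int × String)) (p : Int × String) (ls : List Nat)
    (hdom : ∀ L ∈ ls, ∀ q, g L = some q → q = p ∨ p.1 < q.1) :
    ∀ b0, (b0 = some p ∨
        ((b0 = none ∨ ∃ r, b0 = some r ∧ p.1 < r.1) ∧ ∃ L ∈ ls, g L = some p)) →
      ls.foldl (fun b L => pvStep b (g L)) b0 = some p := by
  induction ls with
  | nil =>
    rintro b0 (rfl | ⟨_, L, hL, _⟩)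
    · rfl
    · exact absurd hL List.not_mem_nil
  | cons L ls ih =>
    intro b0 hb0
    simp only [List.foldl_cons]
    have hdom' : ∀ L' ∈ ls, ∀ q, g L' = some q → q = p ∨ p.1 < q.1 :=
      fun L' hL' => hdom L' (by simp [hL'])
    rcases hb0 with rfl | ⟨hb, L', hL', hgL'⟩
    · -- b0 = some p stays some p
      apply ih hdom'
      left
      cases hgL : g L with
      | none => rfl
      | some q =>
        rcases hdom L (by simp) q hgL with rfl | hlt
        · simp [pvStep]
        · simp [pvStep, not_lt_of_gt hlt]
    · rcases List.mem_cons.mp hL' with rfl | hL'mem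
      · -- the minimal candidate appears right now
        rw [hgL']
        apply ih hdom'
        left
        rcases hb with rfl | ⟨r, rfl, hr⟩
        · rfl
        · simp [pvStep, hr]
      · -- minimal candidate later; current step keeps the invariant
        apply ih hdom'
        cases hgL : g L with
        | none =>
          right
          exact ⟨by simpa [pvStep] using hb, L', hL'mem, hgL'⟩
        | some q =>
          rcases hdom L (by simp) q hgL with rfl | hlt
          · left
            rcases hb with rfl | ⟨r, rfl, hr⟩
            · simp [pvStep]
            · simp [pvStep, hr]
          · right
            refine ⟨?_, L', hL'mem, hgL'⟩
            rcases hb with rfl | ⟨r, rfl, hr⟩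
            · right; exact ⟨q, by simp [pvStep], hlt⟩
            · by_cases hqr : q.1 < r.1
              · right; exact ⟨q, by simp [pvStep, hqr], hlt⟩
              · right; exact ⟨r, by simp [pvStep, hqr], hr⟩

-- a probe that yields a candidate (c, key) means key matches at i and c is key's wtl-index
theorem pvCand_matches (cs : List Char) (wtl : List String) (i L : Nat) (q : Int × String)
    (h : pvCand cs (pvFirstDict wtl) i L = some q) :
    q.2 ∈ wtl ∧ (cs.drop i).take q.2.toList.length = q.2.toList ∧
      Option.map (fun k : Nat => (k : Int)) (PySem.List.index? wtl q.2) = some q.1 := by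
  unfold pvCand at h
  by_cases hle : i + L ≤ cs.length
  · rw [if_pos hle] at h
    cases hget : (pvFirstDict wtl).get? (String.ofList (pvSliceB cs i L)) with
    | none => rw [hget] at h; cases h
    | some c =>
      rw [hget] at h
      simp only [Option.map_some, Option.some.injEq] at h
      subst h
      rw [pvFirstDict_get?] at hget
      have hmem : String.ofList (pvSliceB cs i L) ∈ wtl := by
        by_contra hn
        rw [(PySem.List.index?_eq_none_iff wtl _).mpr hn] at hget
        cases hget
      have hlen : (pvSliceB cs i L).length = L := by
        rw [pvSliceB_eq, List.length_take, List.length_drop]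
        omega
      refine ⟨hmem, ?_, hget⟩
      show (cs.drop i).take (String.ofList (pvSliceB cs i L)).toList.length = _
      rw [String.toList_ofList, hlen, ← pvSliceB_eq]
  · rw [if_neg hle] at h; cases h

-- the index of the FIRST matching token is strictly below the index of any other match
theorem pvFind_idx_lt (pred : String → Bool) (l : List String) (t key : String)
    (h : l.find? pred = some t) (hne : key ≠ t) (hkey : pred key = true) :
    ∀ k k', PySem.List.index? l t = some k → PySem.List.index? l key = some k' → k < k' := by
  induction l with
  | nil => cases h
  | cons x l ih =>
    intro k k' hk hk'
    by_cases hpx : pred x = true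
    · rw [List.find?_cons_of_pos hpx] at h
      injection h with h; subst h
      rw [PySem.List.index?_cons_self] at hk
      injection hk with hk
      rw [PySem.List.index?_cons_of_ne _ (fun he => hne he.symm)] at hk'
      cases hidx : PySem.List.index? l key with
      | none => rw [hidx] at hk'; cases hk'
      | some m =>
        simp only [hidx, Option.map_some, Option.some.injEq] at hk'
        omega
    · rw [List.find?_cons_of_neg (by simpa using hpx)] at h
      have hxt : x ≠ t := fun he => hpx (he ▸ List.find?_some h)
      have hxk : x ≠ key := fun he => hpx (he ▸ hkey)
      rw [PySem.List.index?_cons_of_ne _ hxt] at hk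
      rw [PySem.List.index?_cons_of_ne _ hxk] at hk'
      cases h1 : PySem.List.index? l t with
      | none => rw [h1] at hk; cases hk
      | some m =>
        cases h2 : PySem.List.index? l key with
        | none => rw [h2] at hk'; cases hk'
        | some m' =>
          simp only [h1, h2, Option.map_some, Option.some.injEq] at hk hk'
          have := ih h m m' h1 h2
          omega

-- per-position agreement: B's best candidate is exactly A's first match
theorem pvBest_eq_pvFindA (cs : List Char) (wtl : List String) (i : Nat) (hin : i < cs.length) :
    (pvBest cs (pvFirstDict wtl) (pvLengths wtl) i).map (·.2) = pvFindA cs i wtl := by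
  rw [pvFindA_eq_find?, pvBest_eq_foldStep]
  set pred := fun t : String => decide ((cs.drop i).take t.toList.length = t.toList) with hpred
  cases hf : wtl.find? pred with
  | none =>
    have hno : ∀ t ∈ wtl, ¬ ((cs.drop i).take t.toList.length = t.toList) := by
      intro t ht
      have := List.find?_eq_none.mp hf t ht
      simpa [hpred] using this
    rw [pvFold_none]
    · rfl
    · intro L hL
      cases hc : pvCand cs (pvFirstDict wtl) i L with
      | none => rfl
      | some q =>
        obtain ⟨hm, hmatch, _⟩ := pvCand_matches cs wtl i L q hc
        exact absurd hmatch (hno q.2 hm)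
  | some t =>
    have hpt : (cs.drop i).take t.toList.length = t.toList := by
      have := List.find?_some hf; simpa [hpred] using this
    have htm : t ∈ wtl := List.mem_of_find?_eq_some hf
    obtain ⟨k, hk⟩ : ∃ k, PySem.List.index? wtl t = some k := by
      cases hidx : PySem.List.index? wtl t with
      | none => exact absurd ((PySem.List.index?_eq_none_iff wtl t).mp hidx) (by simp [htm])
      | some k => exact ⟨k, rfl⟩
    have hfold :
        (pvLengths wtl).foldl (fun b L => pvStep b (pvCand cs (pvFirstDict wtl) i L)) none =
          some ((k : Int), t) := by
      apply pvFold_min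
      · intro L hL q hq
        obtain ⟨hm, hmatch, hidx⟩ := pvCand_matches cs wtl i L q hq
        by_cases hqt : q.2 = t
        · left
          obtain ⟨c, hc⟩ := q
          simp only at hqt
          subst hqt
          simp only [Prod.mk.injEq, and_true]
          rw [hk] at hidx
          simpa using hidx.symm
        · right
          obtain ⟨k', hk'1, hk'2⟩ : ∃ k', PySem.List.index? wtl q.2 = some k' ∧ q.1 = (k' : Int) := by
            cases hidx2 : PySem.List.index? wtl q.2 with
            | none => rw [hidx2] at hidx; simp at hidx
            | some k' => rw [hidx2] at hidx; simp at hidx; exact ⟨k', rfl, hidx.symm⟩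
          have hlt := pvFind_idx_lt pred wtl t q.2 hf hqt (by rw [hpred]; exact decide_eq_true hmatch) k k' hk hk'1
          simp only [hk'2]
          exact_mod_cast hlt
      · right
        refine ⟨Or.inl rfl, t.toList.length, ?_, ?_⟩
        · exact (mem_pvLengths wtl t.toList.length).mpr ⟨t, htm, rfl⟩
        · have hle : i + t.toList.length ≤ cs.length := by
            have h1 := congrArg List.length hpt
            simp only [List.length_take, List.length_drop] at h1
            omega  -- uses hin : i < cs.length (take can only reach length cs.length - i)
          have hs : pvSliceB cs i t.toList.length = t.toList := by
            rw [pvSliceB_eq]; exact hpt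
          unfold pvCand
          rw [if_pos hle, hs]
          rw [show String.ofList t.toList = t from by simp]
          rw [pvFirstDict_get?, hk]
          rfl
    rw [hfold]
    rfl

theorem pvLoop_eq (cs : List Char) (wtl : List String) :
    ∀ (fuel i : Nat) (acc : List String),
      pvLoopA cs wtl fuel i acc =
        pvLoopB cs (pvFirstDict wtl) (pvLengths wtl) fuel i acc := by
  intro fuel
  induction fuel with
  | zero => intro i acc; rfl
  | succ fuel ih =>
    intro i acc
    rw [pvLoopA, pvLoopB]
    by_cases hi : i < cs.length
    · rw [if_pos hi, if_pos hi]
      cases hf : pvFindA cs i wtl with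
      | none =>
        have hb : pvBest cs (pvFirstDict wtl) (pvLengths wtl) i = none := by
          have := pvBest_eq_pvFindA cs wtl i hi
          rw [hf] at this
          cases hb : pvBest cs (pvFirstDict wtl) (pvLengths wtl) i with
          | none => rfl
          | some q => rw [hb] at this; simp at this
        rw [hb]
        exact ih (i + 1) (acc ++ ["-"])
      | some t =>
        obtain ⟨c, hb⟩ : ∃ c, pvBest cs (pvFirstDict wtl) (pvLengths wtl) i = some (c, t) := by
          have := pvBest_eq_pvFindA cs wtl i hi
          rw [hf] at this
          cases hb : pvBest cs (pvFirstDict wtl) (pvLengths wtl) i with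
          | none => rw [hb] at this; simp at this
          | some q =>
            rw [hb] at this
            simp only [Option.map_some, Option.some.injEq] at this
            exact ⟨q.1, by rw [← this]⟩
        rw [hb]
        exact ih (i + t.toList.length) (acc ++ [t])
    · rw [if_neg hi, if_neg hi]

-- ===== VERDICT (by name: the statement is the Claim_ definition above) =====
theorem match_ntld_to_wtl_spec : Claim_equal_match_ntld_to_wtl := by
  intro ntld wtl _
  unfold Spec_match_ntld_to_wtl match_ntld_to_wtl match_ntld_to_wtl_alt
  exact pvLoop_eq ntld.toList wtl ntld.toList.length 0 []
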